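-- pv_equiv track=rewrite | github.com/GanziDaeyong/coding_test | etc/python_NameJeom.py | getPass
-- ===== SOURCE A (Python) =====
-- def getPass(pass1):
--     pass_rst = []
--     for i in range(len(pass1) - 1):
--         pass_rst.append((pass1[i] + pass1[i + 1]) % 10)
--     if len(pass_rst) == 2:
--         return pass_rst
--     else:
--         return getPass(pass_rst)
-- ===== SOURCE B (Python) =====
-- def getPass(pass1):
--     # closed form: after n-2 reduction rounds, element i is
--     # sum_j C(n-2, j) * pass1[i+j] (mod 10); binomials built incrementally.
--     k = len(pass1) - 2
--     c = 1
--     s0 = 0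
--     s1 = 0
--     for j in range(k + 1):
--         s0 += c * pass1[j]
--         s1 += c * pass1[j + 1]
--         c = c * (k - j) // (j + 1)
--     return [s0 % 10, s1 % 10]
-- ===== Notes on version B (the rewrite author's own statement) =====
-- stated objective: faster
-- what changed: Replaces A's recursive chain of adjacent-sum reduction rounds (quadratic, with Python recursion depth n-2) by a single linear pass computing each of the two outputs as a binomial-coefficient weighted sum mod 10, with C(n-2,j) built incrementally.
import Mathlib
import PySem

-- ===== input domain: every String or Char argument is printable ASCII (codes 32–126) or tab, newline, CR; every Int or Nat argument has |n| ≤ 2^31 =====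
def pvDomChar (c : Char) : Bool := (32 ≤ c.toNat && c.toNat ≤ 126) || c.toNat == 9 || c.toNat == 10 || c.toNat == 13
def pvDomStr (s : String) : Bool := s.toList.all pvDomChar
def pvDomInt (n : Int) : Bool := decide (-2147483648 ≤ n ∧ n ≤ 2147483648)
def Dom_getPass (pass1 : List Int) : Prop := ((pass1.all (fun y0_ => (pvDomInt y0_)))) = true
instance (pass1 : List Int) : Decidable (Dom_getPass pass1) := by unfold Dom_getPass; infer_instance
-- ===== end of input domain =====

-- B replaces A's chain of adjacent-sum reduction rounds by one linear pass:
-- out[i] = (sum_j C(n-2,j) * pass1[i+j]) mod 10, the binomials built incrementally.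

-- ===== PORT A =====
-- one reduction round: pass_rst.append((pass1[i] + pass1[i+1]) % 10) for i in range(len-1)
def getPassStep (l : List Int) : List Int :=
  (PySem.List.pyRange 0 ((l.length : Int) - 1) 1).foldl
    (fun acc i =>
      acc ++ [PySem.Int.mod (PySem.List.pyGetD l i 0 + PySem.List.pyGetD l (i + 1) 0) 10]) []

-- A's recursion, with fuel only to make it total (A recurses forever on lists shorter
-- than 3; those inputs are outside Pre_; fuel = initial length is always enough inside Pre_)
def getPassFuel : Nat → List Int → List Int
  | 0, l => l
  | fuel + 1, l =>
    let rst := getPassStep l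
    if rst.length = 2 then rst else getPassFuel fuel rst

def getPass (pass1 : List Int) : List Int := getPassFuel pass1.length pass1

-- ===== PORT B =====
def getPass_alt (pass1 : List Int) : List Int :=
  let k : Int := (pass1.length : Int) - 2
  let st :=
    (PySem.List.pyRange 0 (k + 1) 1).foldl
      (fun (s : Int × Int × Int) j =>
        (PySem.Int.floordiv (s.1 * (k - j)) (j + 1),
         s.2.1 + s.1 * PySem.List.pyGetD pass1 j 0,
         s.2.2 + s.1 * PySem.List.pyGetD pass1 (j + 1) 0))
      (1, 0, 0)
  [PySem.Int.mod st.2.1 10, PySem.Int.mod st.2.2 10]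

-- ===== PRECONDITION & SPEC =====
-- Pre_ excludes lists of fewer than 3 elements, on which A recurses forever (RecursionError).
def Pre_getPass (pass1 : List Int) : Prop := 3 ≤ pass1.length
instance (pass1 : List Int) : Decidable (Pre_getPass pass1) := by unfold Pre_getPass; infer_instance
def pvWitness_getPass : List Int := [1, 2, 3, 4]

def Spec_getPass (pass1 : List Int) (out : List Int) : Prop := out = getPass_alt pass1
instance (pass1 : List Int) (out : List Int) : Decidable (Spec_getPass pass1 out) := by unfold Spec_getPass; infer_instance

-- ===== CLAIM (what is proved, stated in full; the proofs are below) =====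
def Claim_equal_getPass : Prop := ∀ (pass1 : List Int), Dom_getPass pass1 → Pre_getPass pass1 → Spec_getPass pass1 (getPass pass1)

-- ===== LEMMAS AND PROOFS =====

-- binomial-weighted window sum: sum_{j≤k} C(k,j) * a(i+j)
def wsum (k : Nat) (a : Nat → Int) (i : Nat) : Int :=
  ∑ j ∈ Finset.range (k + 1), (Nat.choose k j : Int) * a (i + j)

-- Pascal convolution: one adjacent-sum round raises the binomial order by one
lemma wsum_pascal (k : Nat) (a : Nat → Int) (i : Nat) :
    wsum k (fun j => a j + a (j + 1)) i = wsum (k + 1) a i := by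
  unfold wsum
  rw [Finset.sum_range_succ' (fun j => (Nat.choose (k+1) j : Int) * a (i + j)) (k+1)]
  have lhs : ∑ j ∈ Finset.range (k + 1), (Nat.choose k j : Int) * (a (i + j) + a (i + j + 1))
      = (∑ j ∈ Finset.range (k + 1), (Nat.choose k j : Int) * a (i + j))
        + ∑ j ∈ Finset.range (k + 1), (Nat.choose k j : Int) * a (i + j + 1) := by
    rw [← Finset.sum_add_distrib]; apply Finset.sum_congr rfl; intros; ring
  simp only [show ∀ j, i + (j+1) = i + j + 1 from fun j => by omega] at *
  rw [lhs]
  rw [Finset.sum_range_succ' (fun j => (Nat.choose k j : Int) * a (i + j)) k]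
  have ext : ∑ j ∈ Finset.range k, (Nat.choose k (j+1) : Int) * a (i + (j+1))
      = ∑ j ∈ Finset.range (k+1), (Nat.choose k (j+1) : Int) * a (i + j + 1) := by
    rw [Finset.sum_range_succ]
    simp only [Nat.choose_succ_self, Nat.cast_zero, zero_mul, add_zero]
    exact Finset.sum_congr rfl (fun j _ => rfl)
  rw [ext]
  have pas : ∀ x, (Nat.choose (k+1) (x+1) : Int) = (Nat.choose k (x+1) : Int) + (Nat.choose k x : Int) := by
    intro x; rw [Nat.choose_succ_succ']; push_cast; ring
  simp only [pas]
  have dist : ∑ x ∈ Finset.range (k+1), ((Nat.choose k (x+1):Int) + (Nat.choose k x)) * a (i + x + 1)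
      = ∑ x ∈ Finset.range (k+1), (Nat.choose k (x+1):Int) * a (i + x + 1)
        + ∑ x ∈ Finset.range (k+1), (Nat.choose k x:Int) * a (i + x + 1) := by
    rw [← Finset.sum_add_distrib]; apply Finset.sum_congr rfl; intros; ring
  rw [dist]
  simp only [Nat.choose_zero_right]
  ring

-- replacing each term by a value with the same residue keeps the sum's residue
lemma wsum_mod (k : Nat) (a b : Nat → Int) (i : Nat)
    (h : ∀ j, j ≤ k → a (i + j) % 10 = b (i + j) % 10) :
    wsum k a i % 10 = wsum k b i % 10 := by
  unfold wsum
  rw [Finset.sum_int_mod, Finset.sum_int_mod (f := fun j => (Nat.choose k j : Int) * b (i + j))]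
  congr 1
  apply Finset.sum_congr rfl
  intro j hj
  rw [Int.mul_emod, h j (by simp at hj; omega), ← Int.mul_emod]

-- A's reduction round, as a map over indices
lemma getPassStep_eq (l : List Int) :
    getPassStep l = (List.range (l.length - 1)).map
      (fun j => (l.getD j 0 + l.getD (j + 1) 0) % 10) := by
  unfold getPassStep
  rw [PySem.List.foldl_append_singleton_eq_map]
  have h : ((l.length : Int) - 1) = ((l.length - 1 : Nat) : Int) ∨ l.length = 0 := by
    rcases l.length with _ | n
    · right; rfl
    · left; push_cast; omega
  rcases h with h | h
  · rw [h, PySem.List.pyRange_zero_natCast, List.map_map]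
    apply List.map_congr_left
    intro j hj
    simp only [Function.comp, PySem.List.pyGetD_natCast]
    rw [show ((j:Int)+1) = ((j+1:Nat):Int) by push_cast; ring, PySem.List.pyGetD_natCast,
        PySem.Int.mod_eq_emod_of_pos (by norm_num)]
  · simp [h, PySem.List.pyRange_one_eq_nil]

lemma getD_step (l : List Int) (m : Nat) (hm : m < l.length - 1) :
    (getPassStep l).getD m 0 = (l.getD m 0 + l.getD (m + 1) 0) % 10 := by
  rw [getPassStep_eq]
  simp [List.getD, hm]

-- characterisation of A's recursion: the closed binomial form
lemma getPassFuel_eq (fuel : Nat) : ∀ (l : List Int), 3 ≤ l.length → l.length ≤ fuel + 2 →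
    getPassFuel fuel l =
      [wsum (l.length - 2) (fun j => l.getD j 0) 0 % 10,
       wsum (l.length - 2) (fun j => l.getD j 0) 1 % 10] := by
  induction fuel with
  | zero => intro l h1 h2; omega
  | succ fuel ih =>
    intro l h1 h2
    have hlen : (getPassStep l).length = l.length - 1 := by
      rw [getPassStep_eq]; simp
    simp only [getPassFuel]
    by_cases h3 : l.length = 3
    · rw [if_pos (by omega)]
      rw [getPassStep_eq, h3]
      show List.map _ (List.range 2) = _
      rw [show (2:Nat) = 1 + 1 from rfl, List.range_succ, List.range_succ, List.range_zero]
      simp only [List.map_cons, List.map_nil, List.nil_append, List.singleton_append]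
      have w0 : wsum 1 (fun j => l.getD j 0) 0 = l.getD 0 0 + l.getD 1 0 := by
        simp [wsum, Finset.sum_range_succ]
      have w1 : wsum 1 (fun j => l.getD j 0) 1 = l.getD 1 0 + l.getD 2 0 := by
        simp [wsum, Finset.sum_range_succ]
      rw [h3] at *
      simp only [show (3:Nat) - 2 = 1 from rfl]
      rw [w0, w1]
    · rw [if_neg (by omega)]
      rw [ih (getPassStep l) (by omega) (by omega)]
      rw [hlen]
      have key : ∀ i : Nat, i ≤ 1 →
          wsum (l.length - 1 - 2) (fun j => (getPassStep l).getD j 0) i % 10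
          = wsum (l.length - 2) (fun j => l.getD j 0) i % 10 := by
        intro i hi
        have e1 : wsum (l.length - 1 - 2) (fun j => (getPassStep l).getD j 0) i % 10
            = wsum (l.length - 1 - 2) (fun j => l.getD j 0 + l.getD (j+1) 0) i % 10 := by
          apply wsum_mod
          intro j hj
          rw [getD_step l (i+j) (by omega), Int.emod_emod_of_dvd _ dvd_rfl]
        have e2 := wsum_pascal (l.length - 1 - 2) (fun j => l.getD j 0) i
        rw [e1, e2, show l.length - 1 - 2 + 1 = l.length - 2 by omega]
      rw [key 0 (by omega), key 1 (by omega)]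

-- loop invariant of B's single pass: c = C(K,m) and the two partial binomial sums
lemma foldB (l : List Int) (K : Nat) (hK2 : K = l.length - 2) (hK : 3 ≤ l.length) :
    ∀ m, m ≤ K + 1 →
      (PySem.List.pyRange 0 ((m : Nat) : Int) 1).foldl
        (fun (s : Int × Int × Int) j =>
          (PySem.Int.floordiv (s.1 * (((l.length : Int) - 2) - j)) (j + 1),
           s.2.1 + s.1 * PySem.List.pyGetD l j 0,
           s.2.2 + s.1 * PySem.List.pyGetD l (j + 1) 0))
        (1, 0, 0)
      = ((Nat.choose K m : Int),
         ∑ t ∈ Finset.range m, (Nat.choose K t : Int) * l.getD t 0,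
         ∑ t ∈ Finset.range m, (Nat.choose K t : Int) * l.getD (t + 1) 0) := by
  intro m
  induction m with
  | zero => intro _; simp
  | succ m ihm =>
    intro hm
    rw [show (((m+1 : Nat)) : Int) = ((m : Nat) : Int) + 1 by push_cast; ring,
        PySem.List.pyRange_one_succ_right (by positivity),
        List.foldl_append, List.foldl_cons, List.foldl_nil, ihm (by omega)]
    have hcast : ((l.length : Int) - 2) - (m : Int) = ((K - m : Nat) : Int) := by
      omega
    have hc : PySem.Int.floordiv ((Nat.choose K m : Int) * (((l.length : Int) - 2) - (m : Int))) ((m : Int) + 1)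
        = (Nat.choose K (m + 1) : Int) := by
      rw [hcast]
      rw [show ((Nat.choose K m : Int) * ((K - m : Nat) : Int)) = ((Nat.choose K m * (K - m) : Nat) : Int) by push_cast; ring]
      rw [show ((m : Int) + 1) = ((m + 1 : Nat) : Int) by push_cast; ring]
      rw [PySem.Int.floordiv_natCast]
      congr 1
      rw [← Nat.choose_succ_right_eq]
      exact Nat.mul_div_cancel _ (by omega)
    have hg1 : PySem.List.pyGetD l (m : Int) 0 = l.getD m 0 := PySem.List.pyGetD_natCast ..
    have hg2 : PySem.List.pyGetD l ((m : Int) + 1) 0 = l.getD (m + 1) 0 := by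
      rw [show ((m : Int) + 1) = ((m + 1 : Nat) : Int) by push_cast; ring]
      exact PySem.List.pyGetD_natCast ..
    simp only [hc, hg1, hg2]
    rw [Finset.sum_range_succ, Finset.sum_range_succ]

-- characterisation of B
lemma getPass_alt_eq (l : List Int) (h : 3 ≤ l.length) :
    getPass_alt l =
      [wsum (l.length - 2) (fun j => l.getD j 0) 0 % 10,
       wsum (l.length - 2) (fun j => l.getD j 0) 1 % 10] := by
  have hb : ((l.length : Int) - 2) + 1 = (((l.length - 2 + 1 : Nat)) : Int) := by
    push_cast; omega
  simp only [getPass_alt]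
  rw [hb, foldB l (l.length - 2) rfl h (l.length - 2 + 1) le_rfl]
  have hw0 : wsum (l.length - 2) (fun j => l.getD j 0) 0
      = ∑ t ∈ Finset.range (l.length - 2 + 1), (Nat.choose (l.length - 2) t : Int) * l.getD t 0 := by
    simp [wsum]
  have hw1 : wsum (l.length - 2) (fun j => l.getD j 0) 1
      = ∑ t ∈ Finset.range (l.length - 2 + 1), (Nat.choose (l.length - 2) t : Int) * l.getD (t + 1) 0 := by
    unfold wsum
    apply Finset.sum_congr rfl
    intros; rw [Nat.add_comm]
  rw [hw0, hw1, PySem.Int.mod_eq_emod_of_pos (by norm_num),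
      PySem.Int.mod_eq_emod_of_pos (by norm_num)]

-- ===== VERDICT (by name: the statement is the Claim_ definition above) =====
theorem getPass_spec : Claim_equal_getPass := by
  intro l _ hpre
  unfold Spec_getPass
  rw [getPass, getPassFuel_eq l.length l hpre (by omega), getPass_alt_eq l hpre]
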